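-- pv_equiv track=rewrite | github.com/S-Christensen/cartographersStudy | spring/midgameEvaluation.py | treetower_progress
-- ===== SOURCE A (Python) =====
-- def treetower_progress(grid):
--     rows, cols = len(grid), len(grid[0])
--     count = 0
--
--     for r in range(rows):
--         for c in range(cols):
--             if grid[r][c] == "Forest":
--                 surrounded = True
--                 for dr, dc in [(1,0), (-1,0), (0,1), (0,-1)]:
--                     nr, nc = r + dr, c + dc
--                     if 0 <= nr < rows and 0 <= nc < cols:
--                         if grid[nr][nc] in ("0", "Ruins"):
--                             surrounded = False
--                             break
--                 if surrounded:
--                     count += 1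
--
--     return count
-- ===== SOURCE B (Python) =====
-- def treetower_progress(grid):
--     rows, cols = len(grid), len(grid[0])
--     forests = set()
--     blockers = set()
--     for r in range(rows):
--         for c in range(cols):
--             v = grid[r][c]
--             if v == "Forest":
--                 forests.add((r, c))
--             elif v in ("0", "Ruins"):
--                 blockers.add((r, c))
--     disqualified = set()
--     for (r, c) in blockers:
--         for p in ((r + 1, c), (r - 1, c), (r, c + 1), (r, c - 1)):
--             if p in forests:
--                 disqualified.add(p)
--     return len(forests) - len(disqualified)
-- ===== Notes on version B (the rewrite author's own statement) =====
-- stated objective: alternative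
-- what changed: A tests each Forest cell's four neighbors for a blocker; B instead collects the sets of Forest and blocker coordinates in one pass, then marks the forests adjacent to each blocker from the blocker's side and returns |forests| - |disqualified|.
import Mathlib
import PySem

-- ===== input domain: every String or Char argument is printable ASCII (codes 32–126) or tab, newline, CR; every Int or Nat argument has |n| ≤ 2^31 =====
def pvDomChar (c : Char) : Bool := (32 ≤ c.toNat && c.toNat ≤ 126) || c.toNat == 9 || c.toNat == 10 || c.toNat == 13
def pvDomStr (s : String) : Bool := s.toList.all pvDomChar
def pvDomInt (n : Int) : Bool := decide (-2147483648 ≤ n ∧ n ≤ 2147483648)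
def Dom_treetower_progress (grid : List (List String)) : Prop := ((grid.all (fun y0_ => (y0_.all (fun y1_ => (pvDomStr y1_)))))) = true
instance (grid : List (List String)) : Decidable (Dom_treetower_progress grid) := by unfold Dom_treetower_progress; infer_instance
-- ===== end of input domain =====

-- B replaces A's per-forest neighbor probing by an inverted scan: one pass collects the sets of
-- Forest and blocker coordinates, then each blocker disqualifies its adjacent forests and the
-- result is |forests| - |disqualified| (objective: alternative decomposition, same cost).


-- ===== PORT A =====
-- grid[r][c]; total with defaults, exact under Pre_ (every access A makes is in range there)
def tpGetA (grid : List (List String)) (r c : Int) : String :=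
  PySem.List.pyGetD (PySem.List.pyGetD grid r []) c ""

def treetower_progress (grid : List (List String)) : Int :=
  let rows : Int := grid.length
  let cols : Int := (grid.headD []).length
  (PySem.List.pyRange 0 rows 1).foldl (fun count r =>
    (PySem.List.pyRange 0 cols 1).foldl (fun count c =>
      if tpGetA grid r c == "Forest" then
        -- the for-loop over the four offsets with break: surrounded ↔ no offset hits a blocker
        if [((1:Int),(0:Int)), (-1,0), (0,1), (0,-1)].all (fun d =>
             !(decide (0 ≤ r + d.1) && decide (r + d.1 < rows) &&
               decide (0 ≤ c + d.2) && decide (c + d.2 < cols) &&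
               (tpGetA grid (r + d.1) (c + d.2) == "0" ||
                tpGetA grid (r + d.1) (c + d.2) == "Ruins")))
        then count + 1 else count
      else count) count) 0

-- ===== PORT B =====
-- the four neighbour coordinates of a blocker, as in Source B's tuple
def tpNbrs (p : Int × Int) : List (Int × Int) :=
  [(p.1 + 1, p.2), (p.1 - 1, p.2), (p.1, p.2 + 1), (p.1, p.2 - 1)]

def treetower_progress_alt (grid : List (List String)) : Int :=
  let rows : Int := grid.length
  let cols : Int := (grid.headD []).length
  let fb : PySem.Set (Int × Int) × PySem.Set (Int × Int) :=
    (PySem.List.pyRange 0 rows 1).foldl (fun fb r =>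
      (PySem.List.pyRange 0 cols 1).foldl (fun fb c =>
        let v := tpGetA grid r c
        if v == "Forest" then (PySem.Set.add fb.1 (r, c), fb.2)
        else if v == "0" || v == "Ruins" then (fb.1, PySem.Set.add fb.2 (r, c))
        else fb) fb) (PySem.Set.empty, PySem.Set.empty)
  let disq : PySem.Set (Int × Int) :=
    fb.2.foldl (fun d p =>
      (tpNbrs p).foldl (fun d q =>
        if PySem.Set.contains fb.1 q then PySem.Set.add d q else d) d)
      PySem.Set.empty
  PySem.Set.len fb.1 - PySem.Set.len disq

-- ===== PRECONDITION & SPEC =====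
-- Pre_ excludes exactly the inputs where Python A raises IndexError: the empty grid (len(grid[0]))
-- and grids with a row shorter than the first row (grid[r][c] for c < cols).
def Pre_treetower_progress (grid : List (List String)) : Prop :=
  grid ≠ [] ∧ ∀ row ∈ grid, (grid.headD []).length ≤ row.length
instance (grid : List (List String)) : Decidable (Pre_treetower_progress grid) := by
  unfold Pre_treetower_progress; infer_instance

def pvWitness_treetower_progress : List (List String) :=
  [["Forest", "0"], ["x", "Forest"]]

def Spec_treetower_progress (grid : List (List String)) (out : Int) : Prop := out = treetower_progress_alt grid
instance (grid : List (List String)) (out : Int) : Decidable (Spec_treetower_progress grid out) := by unfold Spec_treetower_progress; infer_instance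

-- ===== CLAIM (what is proved, stated in full; the proofs are below) =====
def Claim_equal_treetower_progress : Prop := ∀ (grid : List (List String)), Dom_treetower_progress grid → Pre_treetower_progress grid → Spec_treetower_progress grid (treetower_progress grid)

-- ===== LEMMAS AND PROOFS =====

def tpCells (rows cols : Int) : List (Int × Int) :=
  (PySem.List.pyRange 0 rows 1).flatMap (fun r =>
    (PySem.List.pyRange 0 cols 1).map (fun c => (r, c)))
def tpIsF (grid : List (List String)) (p : Int × Int) : Bool :=
  tpGetA grid p.1 p.2 == "Forest"
def tpIsB (grid : List (List String)) (p : Int × Int) : Bool :=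
  tpGetA grid p.1 p.2 == "0" || tpGetA grid p.1 p.2 == "Ruins"
def tpInB (rows cols : Int) (p : Int × Int) : Bool :=
  decide (0 ≤ p.1) && decide (p.1 < rows) && decide (0 ≤ p.2) && decide (p.2 < cols)
def tpAdj (grid : List (List String)) (rows cols : Int) (p : Int × Int) : Bool :=
  (tpNbrs p).any (fun q => tpInB rows cols q && tpIsB grid q)

lemma tpNbrs_symm (x b : Int × Int) : x ∈ tpNbrs b ↔ b ∈ tpNbrs x := by
  simp [tpNbrs, Prod.ext_iff]; omega

lemma mem_tpCells (rows cols : Int) (p : Int × Int) :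
    p ∈ tpCells rows cols ↔ tpInB rows cols p = true := by
  obtain ⟨r, c⟩ := p
  simp [tpCells, tpInB, PySem.List.mem_pyRange_one]
  tauto

lemma nodup_tpCells (rows cols : Int) : (tpCells rows cols).Nodup := by
  unfold tpCells
  rw [List.nodup_flatMap]
  refine ⟨fun r _ => (PySem.List.nodup_pyRange_one 0 cols).map (fun a b h => by simpa using h), ?_⟩
  refine List.Pairwise.imp (R := (· ≠ ·)) ?_
    ((PySem.List.nodup_pyRange_one 0 rows).pairwise_of_forall_ne (fun a _ b _ h => h))
  intro a b hab
  simp only [Function.onFun, List.Disjoint, List.mem_map]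
  rintro x ⟨c, -, rfl⟩ ⟨c', -, h⟩
  exact hab (congrArg Prod.fst h).symm

lemma sur_eq (grid : List (List String)) (rows cols r c : Int) :
    [((1:Int),(0:Int)), (-1,0), (0,1), (0,-1)].all (fun d =>
      !(decide (0 ≤ r + d.1) && decide (r + d.1 < rows) &&
        decide (0 ≤ c + d.2) && decide (c + d.2 < cols) &&
        (tpGetA grid (r + d.1) (c + d.2) == "0" ||
         tpGetA grid (r + d.1) (c + d.2) == "Ruins")))
    = !tpAdj grid rows cols (r, c) := by
  simp only [tpAdj, tpNbrs, tpInB, tpIsB, List.any_cons, List.any_nil, List.all_cons, List.all_nil,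
    Bool.not_or, Bool.or_false, Bool.and_true, add_zero, sub_eq_add_neg]

lemma A_eq_countP (grid : List (List String)) :
    treetower_progress grid =
      ((tpCells grid.length (grid.headD []).length).countP
        (fun p => tpIsF grid p && !tpAdj grid grid.length (grid.headD []).length p) : Int) := by
  unfold treetower_progress tpCells
  dsimp only
  have h1 : (PySem.List.pyRange 0 (grid.length : Int) 1).foldl (fun (count : Int) r =>
      (PySem.List.pyRange 0 ((grid.headD []).length : Int) 1).foldl (fun count c =>
        if tpGetA grid r c == "Forest" then
          if [((1:Int),(0:Int)), (-1,0), (0,1), (0,-1)].all (fun d =>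
               !(decide (0 <= r + d.1) && decide (r + d.1 < (grid.length : Int)) &&
                 decide (0 <= c + d.2) && decide (c + d.2 < ((grid.headD []).length : Int)) &&
                 (tpGetA grid (r + d.1) (c + d.2) == "0" ||
                  tpGetA grid (r + d.1) (c + d.2) == "Ruins")))
          then count + 1 else count
        else count) count) 0
    = (PySem.List.pyRange 0 (grid.length : Int) 1).foldl (fun (count : Int) r =>
        ((PySem.List.pyRange 0 ((grid.headD []).length : Int) 1).map (fun c => (r, c))).foldl
          (fun count p =>
            if (tpIsF grid p && !tpAdj grid grid.length (grid.headD []).length p) = true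
            then count + 1 else count) count) 0 := by
    apply PySem.List.foldl_congr_mem
    intro count r _
    rw [List.foldl_map]
    apply PySem.List.foldl_congr_mem
    intro acc c _
    rw [sur_eq]
    simp only [tpIsF]
    by_cases hf : tpGetA grid r c == "Forest" <;>
      by_cases ha : tpAdj grid (grid.length : Int) ((grid.headD []).length : Int) (r, c) <;>
      simp_all
  refine h1.trans ?_
  rw [<- List.foldl_flatMap, PySem.List.foldl_count_if]
  simp

def tpStep (grid : List (List String))
    (fb : PySem.Set (Int × Int) × PySem.Set (Int × Int)) (p : Int × Int) :
    PySem.Set (Int × Int) × PySem.Set (Int × Int) :=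
  let v := tpGetA grid p.1 p.2
  if v == "Forest" then (PySem.Set.add fb.1 p, fb.2)
  else if v == "0" || v == "Ruins" then (fb.1, PySem.Set.add fb.2 p)
  else fb

lemma tpStep_build (grid : List (List String)) (cs : List (Int × Int)) :
    ∀ (f k : PySem.Set (Int × Int)), cs.Nodup →
    (∀ p ∈ cs, p ∉ f) → (∀ p ∈ cs, p ∉ k) →
    cs.foldl (tpStep grid) (f, k) =
      (f ++ cs.filter (tpIsF grid), k ++ cs.filter (tpIsB grid)) := by
  induction cs with
  | nil => simp
  | cons p cs ih =>
    intro f k hnd hf hk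
    have hpf : p ∉ f := hf p (by simp)
    have hpk : p ∉ k := hk p (by simp)
    have hnd' := (List.nodup_cons.mp hnd)
    by_cases hF : tpIsF grid p
    · have hstep : tpStep grid (f, k) p = (f ++ [p], k) := by
        simp only [tpStep, tpIsF, tpGetA] at hF ⊢
        rw [if_pos hF, PySem.Set.add_of_not_mem hpf]
      rw [List.foldl_cons, hstep,
        ih (f ++ [p]) k hnd'.2
          (fun q hq => by simp; exact ⟨fun h => hf q (by simp [hq]) h, fun h => hnd'.1 (h ▸ hq)⟩)
          (fun q hq => hk q (by simp [hq]))]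
      have hB : tpIsB grid p = false := by
        simp only [tpIsF, beq_iff_eq] at hF
        simp [tpIsB, hF]
      simp [hF, hB]
    · by_cases hB : tpIsB grid p
      · have hstep : tpStep grid (f, k) p = (f, k ++ [p]) := by
          simp only [tpStep, tpIsF, tpIsB, tpGetA] at hF hB ⊢
          rw [if_neg (by simpa using hF), if_pos hB, PySem.Set.add_of_not_mem hpk]
        rw [List.foldl_cons, hstep,
          ih f (k ++ [p]) hnd'.2
            (fun q hq => hf q (by simp [hq]))
            (fun q hq => by simp; exact ⟨fun h => hk q (by simp [hq]) h, fun h => hnd'.1 (h ▸ hq)⟩)]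
        simp [hF, hB]
      · have hstep : tpStep grid (f, k) p = (f, k) := by
          simp only [tpStep, tpIsF, tpIsB, tpGetA] at hF hB ⊢
          rw [if_neg (by simpa using hF), if_neg (by simpa using hB)]
        rw [List.foldl_cons, hstep,
          ih f k hnd'.2 (fun q hq => hf q (by simp [hq])) (fun q hq => hk q (by simp [hq]))]
        simp [hF, hB]

lemma tpDisq_inner_mem (F : PySem.Set (Int × Int)) (l : List (Int × Int)) :
    ∀ (d : PySem.Set (Int × Int)) (x : Int × Int),
    (x ∈ l.foldl (fun d q => if PySem.Set.contains F q then PySem.Set.add d q else d) d ↔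
      x ∈ d ∨ (x ∈ l ∧ x ∈ F)) := by
  induction l with
  | nil => simp
  | cons q l ih =>
    intro d x
    rw [List.foldl_cons]
    by_cases hq : PySem.Set.contains F q
    · rw [if_pos hq, ih]
      have := (PySem.Set.contains_iff F q).mp hq
      rw [PySem.Set.mem_add]
      constructor
      · rintro (⟨h | rfl⟩ | ⟨h1, h2⟩)
        · exact Or.inl h
        · exact Or.inr ⟨by simp, this⟩
        · exact Or.inr ⟨by simp [h1], h2⟩
      · rintro (h | ⟨h1, h2⟩)
        · exact Or.inl (Or.inl h)
        · rcases List.mem_cons.mp h1 with rfl | h1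
          · exact Or.inl (Or.inr rfl)
          · exact Or.inr ⟨h1, h2⟩
    · rw [if_neg hq, ih]
      have hnq : q ∉ F := fun h => hq ((PySem.Set.contains_iff F q).mpr h)
      constructor
      · rintro (h | ⟨h1, h2⟩)
        · exact Or.inl h
        · exact Or.inr ⟨by simp [h1], h2⟩
      · rintro (h | ⟨h1, h2⟩)
        · exact Or.inl h
        · rcases List.mem_cons.mp h1 with rfl | h1
          · exact absurd h2 hnq
          · exact Or.inr ⟨h1, h2⟩

lemma tpDisq_inner_nodup (F : PySem.Set (Int × Int)) (l : List (Int × Int)) :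
    ∀ (d : PySem.Set (Int × Int)), d.Nodup →
    (l.foldl (fun d q => if PySem.Set.contains F q then PySem.Set.add d q else d) d).Nodup := by
  induction l with
  | nil => simp
  | cons q l ih =>
    intro d hd
    rw [List.foldl_cons]
    by_cases hq : PySem.Set.contains F q
    · rw [if_pos hq]; exact ih _ (PySem.Set.nodup_add d q hd)
    · rw [if_neg hq]; exact ih _ hd

lemma tpDisq_mem (F : PySem.Set (Int × Int)) (K : List (Int × Int)) :
    ∀ (d : PySem.Set (Int × Int)) (x : Int × Int),
    (x ∈ K.foldl (fun d p =>
        (tpNbrs p).foldl (fun d q => if PySem.Set.contains F q then PySem.Set.add d q else d) d) d ↔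
      x ∈ d ∨ ∃ b ∈ K, x ∈ tpNbrs b ∧ x ∈ F) := by
  induction K with
  | nil => simp
  | cons b K ih =>
    intro d x
    rw [List.foldl_cons, ih, tpDisq_inner_mem]
    constructor
    · rintro ((h | ⟨h1, h2⟩) | ⟨b', hb', h1, h2⟩)
      · exact Or.inl h
      · exact Or.inr ⟨b, by simp, h1, h2⟩
      · exact Or.inr ⟨b', by simp [hb'], h1, h2⟩
    · rintro (h | ⟨b', hb', h1, h2⟩)
      · exact Or.inl (Or.inl h)
      · rcases List.mem_cons.mp hb' with rfl | hb'
        · exact Or.inl (Or.inr ⟨h1, h2⟩)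
        · exact Or.inr ⟨b', hb', h1, h2⟩

lemma tpDisq_nodup (F : PySem.Set (Int × Int)) (K : List (Int × Int)) :
    ∀ (d : PySem.Set (Int × Int)), d.Nodup →
    (K.foldl (fun d p =>
        (tpNbrs p).foldl (fun d q => if PySem.Set.contains F q then PySem.Set.add d q else d) d) d).Nodup := by
  induction K with
  | nil => simp
  | cons b K ih =>
    intro d hd
    rw [List.foldl_cons]
    exact ih _ (tpDisq_inner_nodup F (tpNbrs b) d hd)

lemma B_eq_countP (grid : List (List String)) :
    treetower_progress_alt grid =
      ((tpCells grid.length (grid.headD []).length).countP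
        (fun p => tpIsF grid p && !tpAdj grid grid.length (grid.headD []).length p) : Int) := by
  unfold treetower_progress_alt
  dsimp only
  have hfb : (PySem.List.pyRange 0 (grid.length : Int) 1).foldl (fun fb r =>
      (PySem.List.pyRange 0 ((grid.headD []).length : Int) 1).foldl (fun fb c =>
        let v := tpGetA grid r c
        if v == "Forest" then (PySem.Set.add fb.1 (r, c), fb.2)
        else if v == "0" || v == "Ruins" then (fb.1, PySem.Set.add fb.2 (r, c))
        else fb) fb) ((PySem.Set.empty : PySem.Set (Int × Int)), (PySem.Set.empty : PySem.Set (Int × Int)))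
      = ((tpCells grid.length (grid.headD []).length).filter (tpIsF grid),
         (tpCells grid.length (grid.headD []).length).filter (tpIsB grid)) := by
    have h1 : (PySem.List.pyRange 0 (grid.length : Int) 1).foldl (fun fb r =>
        (PySem.List.pyRange 0 ((grid.headD []).length : Int) 1).foldl (fun fb c =>
          let v := tpGetA grid r c
          if v == "Forest" then (PySem.Set.add fb.1 (r, c), fb.2)
          else if v == "0" || v == "Ruins" then (fb.1, PySem.Set.add fb.2 (r, c))
          else fb) fb) ((PySem.Set.empty : PySem.Set (Int × Int)), (PySem.Set.empty : PySem.Set (Int × Int)))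
        = (PySem.List.pyRange 0 (grid.length : Int) 1).foldl (fun fb r =>
            ((PySem.List.pyRange 0 ((grid.headD []).length : Int) 1).map (fun c => (r, c))).foldl
              (tpStep grid) fb) ((PySem.Set.empty : PySem.Set (Int × Int)), (PySem.Set.empty : PySem.Set (Int × Int))) := by
      apply PySem.List.foldl_congr_mem
      intro fb r _
      rw [List.foldl_map]
      rfl
    rw [h1, ← List.foldl_flatMap]
    have := tpStep_build grid (tpCells grid.length (grid.headD []).length)
      PySem.Set.empty PySem.Set.empty (nodup_tpCells _ _) (by simp [PySem.Set.empty]) (by simp [PySem.Set.empty])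
    simpa [tpCells, PySem.Set.empty] using this
  rw [hfb]
  set F := (tpCells grid.length (grid.headD []).length).filter (tpIsF grid) with hF
  set K := (tpCells grid.length (grid.headD []).length).filter (tpIsB grid) with hK
  dsimp only
  set D := K.foldl (fun d p =>
      (tpNbrs p).foldl (fun d q => if PySem.Set.contains F q then PySem.Set.add d q else d) d)
      (PySem.Set.empty : PySem.Set (Int × Int)) with hD
  have hFnd : F.Nodup := (nodup_tpCells _ _).filter _
  have hDnd : D.Nodup := tpDisq_nodup F K PySem.Set.empty (by simp [PySem.Set.empty])
  have hmem : ∀ x, x ∈ D ↔ x ∈ F ∧ tpAdj grid grid.length (grid.headD []).length x = true := by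
    intro x
    rw [hD, tpDisq_mem]
    simp only [PySem.Set.empty, List.not_mem_nil, false_or]
    constructor
    · rintro ⟨b, hbK, hxn, hxF⟩
      refine ⟨hxF, ?_⟩
      simp only [tpAdj, List.any_eq_true]
      refine ⟨b, (tpNbrs_symm x b).mp hxn, ?_⟩
      rw [hK, List.mem_filter, mem_tpCells] at hbK
      simp only [Bool.and_eq_true]
      exact ⟨hbK.1, hbK.2⟩
    · rintro ⟨hxF, hadj⟩
      simp only [tpAdj, List.any_eq_true, Bool.and_eq_true] at hadj
      obtain ⟨b, hbn, hb1, hb2⟩ := hadj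
      refine ⟨b, ?_, (tpNbrs_symm x b).mpr hbn, hxF⟩
      rw [hK, List.mem_filter, mem_tpCells]
      exact ⟨hb1, hb2⟩
  have hlen : D.length = F.countP (tpAdj grid grid.length (grid.headD []).length) := by
    rw [List.countP_eq_length_filter]
    exact ((List.perm_ext_iff_of_nodup hDnd (hFnd.filter _)).mpr
      (fun x => (hmem x).trans (List.mem_filter).symm)).length_eq
  have hcount : (tpCells grid.length (grid.headD []).length).countP
      (fun p => tpIsF grid p && !tpAdj grid grid.length (grid.headD []).length p)
      = F.countP (fun p => !tpAdj grid grid.length (grid.headD []).length p) := by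
    rw [hF, List.countP_filter]
    congr 1
    funext p
    exact Bool.and_comm _ _
  have hsplit : F.countP (tpAdj grid grid.length (grid.headD []).length)
      + F.countP (fun p => !tpAdj grid grid.length (grid.headD []).length p) = F.length := by
    simpa using (List.length_eq_countP_add_countP (tpAdj grid grid.length (grid.headD []).length) (l := F)).symm
  rw [hcount]
  simp only [PySem.Set.len_eq, hlen]
  omega

-- ===== VERDICT (by name: the statement is the Claim_ definition above) =====
theorem treetower_progress_spec : Claim_equal_treetower_progress := by
  intro grid _ _
  unfold Spec_treetower_progress
  exact (A_eq_countP grid).trans (B_eq_countP grid).symm
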